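-- pv_equiv track=rewrite | github.com/alexeydott/DelphiLibOpenSSL | helpers/gen_case_collision_fixes.py | categorize_defines
-- ===== SOURCE A (Python) =====
-- from collections import defaultdict
--
-- def categorize_defines(defines):
--     """Group defines into logical categories based on naming patterns."""
--     cats = defaultdict(list)
--     for old, new in defines.items():
--         lo = old.lower()
--         if 'provider' in lo or 'lib_ctx' in lo:
--             cats['Provider internals'].append((old, new))
--         elif lo.startswith('bio_') or lo == 'bio_wait':
--             cats['BIO internals'].append((old, new))
--         elif lo.startswith('ssl_'):
--             cats['SSL internals'].append((old, new))
--         elif lo.startswith('evp_'):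
--             cats['EVP internals'].append((old, new))
--         elif 'cipher' in lo and 'evp' not in lo:
--             cats['Cipher helpers'].append((old, new))
--         elif lo.startswith('ossl_decoder') or lo.startswith('ossl_encoder'):
--             cats['Encoder/Decoder internals'].append((old, new))
--         elif lo.startswith('ossl_prov_ctx'):
--             cats['Provider context helpers'].append((old, new))
--         elif 'err' in lo:
--             cats['Error subsystem'].append((old, new))
--         elif any(lo.startswith(p) for p in ('dh_', 'dsa_', 'rsa_', 'ecdsa_')):
--             cats['DH/DSA/RSA/ECDSA internals'].append((old, new))
--         elif any(lo.startswith(p) for p in ('hmac_', 'siphash_', 'poly1305_')):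
--             cats['MAC/Hash internals'].append((old, new))
--         elif lo.startswith('pkcs12_') or lo.startswith('rand_'):
--             cats['PKCS12/RAND internals'].append((old, new))
--         elif lo.startswith('bn_'):
--             cats['BN internals'].append((old, new))
--         elif lo.startswith('ossl_hpke') or lo.startswith('ossl_cmp'):
--             cats['HPKE/CMP internals'].append((old, new))
--         elif 'ecpkparameters' in lo.lower():
--             cats['EC ASN.1'].append((old, new))
--         elif 'ocsp' in lo.lower():
--             cats['OCSP'].append((old, new))
--         else:
--             cats['Other'].append((old, new))
--
--     # Return in a stable order
--     order = [
--         'Provider internals', 'Provider context helpers',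
--         'BIO internals', 'SSL internals', 'EVP internals',
--         'Cipher helpers', 'Encoder/Decoder internals',
--         'Error subsystem', 'DH/DSA/RSA/ECDSA internals',
--         'MAC/Hash internals', 'PKCS12/RAND internals',
--         'BN internals', 'EC ASN.1', 'HPKE/CMP internals',
--         'OCSP', 'Other',
--     ]
--     result = []
--     for cat in order:
--         if cat in cats:
--             result.append((cat, cats[cat]))
--     # Any remaining categories
--     for cat in sorted(cats.keys()):
--         if cat not in order:
--             result.append((cat, cats[cat]))
--     return result
-- ===== SOURCE B (Python) =====
-- def _sieve(rules, items):
--     """Successively partition items through the rule list; returns groups in rule order plus the leftover."""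
--     if not rules:
--         return [('Other', items)]
--     name, pred = rules[0]
--     matched = [it for it in items if pred(it[0].lower())]
--     rest = [it for it in items if not pred(it[0].lower())]
--     return [(name, matched)] + _sieve(rules[1:], rest)
--
-- PRIORITY = [
--     ('Provider internals', lambda lo: 'provider' in lo or 'lib_ctx' in lo),
--     ('BIO internals', lambda lo: lo.startswith('bio_') or lo == 'bio_wait'),
--     ('SSL internals', lambda lo: lo.startswith('ssl_')),
--     ('EVP internals', lambda lo: lo.startswith('evp_')),
--     ('Cipher helpers', lambda lo: 'cipher' in lo and 'evp' not in lo),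
--     ('Encoder/Decoder internals', lambda lo: lo.startswith('ossl_decoder') or lo.startswith('ossl_encoder')),
--     ('Provider context helpers', lambda lo: lo.startswith('ossl_prov_ctx')),
--     ('Error subsystem', lambda lo: 'err' in lo),
--     ('DH/DSA/RSA/ECDSA internals', lambda lo: lo.startswith(('dh_', 'dsa_', 'rsa_', 'ecdsa_'))),
--     ('MAC/Hash internals', lambda lo: lo.startswith(('hmac_', 'siphash_', 'poly1305_'))),
--     ('PKCS12/RAND internals', lambda lo: lo.startswith(('pkcs12_', 'rand_'))),
--     ('BN internals', lambda lo: lo.startswith('bn_')),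
--     ('HPKE/CMP internals', lambda lo: lo.startswith(('ossl_hpke', 'ossl_cmp'))),
--     ('EC ASN.1', lambda lo: 'ecpkparameters' in lo),
--     ('OCSP', lambda lo: 'ocsp' in lo),
-- ]
--
-- ORDER = [
--     'Provider internals', 'Provider context helpers',
--     'BIO internals', 'SSL internals', 'EVP internals',
--     'Cipher helpers', 'Encoder/Decoder internals',
--     'Error subsystem', 'DH/DSA/RSA/ECDSA internals',
--     'MAC/Hash internals', 'PKCS12/RAND internals',
--     'BN internals', 'EC ASN.1', 'HPKE/CMP internals',
--     'OCSP', 'Other',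
-- ]
--
-- def categorize_defines(defines):
--     """Group defines by sieving the whole item list through the rules, one partition pass per rule."""
--     groups = dict(_sieve(PRIORITY, list(defines.items())))
--     return [(c, groups[c]) for c in ORDER if groups[c]]
-- ===== Notes on version B (the rewrite author's own statement) =====
-- stated objective: alternative
-- what changed: Replaces A's single loop that runs every item through a 16-branch elif cascade into a defaultdict with a recursive sieve: one stable partition pass per rule over the shrinking remainder list (matched items become that rule's group, the rest flow to the next rule, the final remainder is 'Other'), then one ordered comprehension over the fixed category list; the dead 'remaining categories' sorted loop disappears.
import Mathlib
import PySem

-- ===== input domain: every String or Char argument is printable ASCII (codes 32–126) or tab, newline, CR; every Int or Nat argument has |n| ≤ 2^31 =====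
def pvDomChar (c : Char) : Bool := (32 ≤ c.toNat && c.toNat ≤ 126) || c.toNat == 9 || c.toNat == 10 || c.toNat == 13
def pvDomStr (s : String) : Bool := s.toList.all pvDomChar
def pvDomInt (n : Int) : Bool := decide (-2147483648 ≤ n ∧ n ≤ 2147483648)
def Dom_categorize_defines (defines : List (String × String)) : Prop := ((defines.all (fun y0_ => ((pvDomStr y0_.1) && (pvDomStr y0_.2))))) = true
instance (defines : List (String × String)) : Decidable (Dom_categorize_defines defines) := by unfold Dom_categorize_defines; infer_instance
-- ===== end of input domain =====

-- B replaces A's per-item 16-branch elif cascade plus defaultdict with a sieve: one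
-- stable partition pass per rule over the shrinking remainder list (objective: alternative).

-- ===== PORT A =====
-- one iteration of A's for-loop: the 16-branch elif cascade, each branch appending to its category
def pvStepA (cats : PySem.Dict String (List (String × String))) (p : String × String) : PySem.Dict String (List (String × String)) :=
  let lo := PySem.Str.lower p.1
  let app := fun (name : String) => cats.modify name [] (fun l => l ++ [(p.1, p.2)])
  if PySem.Str.isIn "provider" lo || PySem.Str.isIn "lib_ctx" lo then app "Provider internals"
  else if PySem.Str.startswith lo "bio_" || lo == "bio_wait" then app "BIO internals"
  else if PySem.Str.startswith lo "ssl_" then app "SSL internals"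
  else if PySem.Str.startswith lo "evp_" then app "EVP internals"
  else if PySem.Str.isIn "cipher" lo && !(PySem.Str.isIn "evp" lo) then app "Cipher helpers"
  else if PySem.Str.startswith lo "ossl_decoder" || PySem.Str.startswith lo "ossl_encoder" then app "Encoder/Decoder internals"
  else if PySem.Str.startswith lo "ossl_prov_ctx" then app "Provider context helpers"
  else if PySem.Str.isIn "err" lo then app "Error subsystem"
  else if ["dh_", "dsa_", "rsa_", "ecdsa_"].any (fun q => PySem.Str.startswith lo q) then app "DH/DSA/RSA/ECDSA internals"
  else if ["hmac_", "siphash_", "poly1305_"].any (fun q => PySem.Str.startswith lo q) then app "MAC/Hash internals"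
  else if PySem.Str.startswith lo "pkcs12_" || PySem.Str.startswith lo "rand_" then app "PKCS12/RAND internals"
  else if PySem.Str.startswith lo "bn_" then app "BN internals"
  else if PySem.Str.startswith lo "ossl_hpke" || PySem.Str.startswith lo "ossl_cmp" then app "HPKE/CMP internals"
  else if PySem.Str.isIn "ecpkparameters" (PySem.Str.lower lo) then app "EC ASN.1"
  else if PySem.Str.isIn "ocsp" (PySem.Str.lower lo) then app "OCSP"
  else app "Other"

-- A's 'order' list
def pvOrderA : List String :=
  ["Provider internals", "Provider context helpers",
   "BIO internals", "SSL internals", "EVP internals",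
   "Cipher helpers", "Encoder/Decoder internals",
   "Error subsystem", "DH/DSA/RSA/ECDSA internals",
   "MAC/Hash internals", "PKCS12/RAND internals",
   "BN internals", "EC ASN.1", "HPKE/CMP internals",
   "OCSP", "Other"]

def categorize_defines (defines : List (String × String)) : List (String × (List (String × String))) :=
  let cats := defines.foldl pvStepA PySem.Dict.empty
  let result := pvOrderA.foldl
    (fun r cat => if cats.contains cat then r ++ [(cat, cats.getD cat [])] else r) []
  -- "Any remaining categories": for cat in sorted(cats.keys()): if cat not in order: …
  (PySem.List.sorted cats.keys (fun x => x) false).foldl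
    (fun r cat => if !(pvOrderA.contains cat) then r ++ [(cat, cats.getD cat [])] else r) result

-- ===== PORT B =====
-- B's PRIORITY rule table: (category name, predicate of the lowercased old name)
def pvPriority : List (String × (String → Bool)) :=
  [("Provider internals", fun lo => PySem.Str.isIn "provider" lo || PySem.Str.isIn "lib_ctx" lo),
   ("BIO internals", fun lo => PySem.Str.startswith lo "bio_" || lo == "bio_wait"),
   ("SSL internals", fun lo => PySem.Str.startswith lo "ssl_"),
   ("EVP internals", fun lo => PySem.Str.startswith lo "evp_"),
   ("Cipher helpers", fun lo => PySem.Str.isIn "cipher" lo && !(PySem.Str.isIn "evp" lo)),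
   ("Encoder/Decoder internals", fun lo => PySem.Str.startswith lo "ossl_decoder" || PySem.Str.startswith lo "ossl_encoder"),
   ("Provider context helpers", fun lo => PySem.Str.startswith lo "ossl_prov_ctx"),
   ("Error subsystem", fun lo => PySem.Str.isIn "err" lo),
   ("DH/DSA/RSA/ECDSA internals", fun lo => ["dh_", "dsa_", "rsa_", "ecdsa_"].any (fun q => PySem.Str.startswith lo q)),
   ("MAC/Hash internals", fun lo => ["hmac_", "siphash_", "poly1305_"].any (fun q => PySem.Str.startswith lo q)),
   ("PKCS12/RAND internals", fun lo => ["pkcs12_", "rand_"].any (fun q => PySem.Str.startswith lo q)),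
   ("BN internals", fun lo => PySem.Str.startswith lo "bn_"),
   ("HPKE/CMP internals", fun lo => ["ossl_hpke", "ossl_cmp"].any (fun q => PySem.Str.startswith lo q)),
   ("EC ASN.1", fun lo => PySem.Str.isIn "ecpkparameters" lo),
   ("OCSP", fun lo => PySem.Str.isIn "ocsp" lo)]

-- B's ORDER list (the fixed output order)
def pvOrderB : List String :=
  ["Provider internals", "Provider context helpers",
   "BIO internals", "SSL internals", "EVP internals",
   "Cipher helpers", "Encoder/Decoder internals",
   "Error subsystem", "DH/DSA/RSA/ECDSA internals",
   "MAC/Hash internals", "PKCS12/RAND internals",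
   "BN internals", "EC ASN.1", "HPKE/CMP internals",
   "OCSP", "Other"]

-- _sieve: recursively partition the item list through the rules, one pass per rule
def pvSieve : List (String × (String → Bool)) → List (String × String) → List (String × List (String × String))
  | [], items => [("Other", items)]
  | (n, p) :: rs, items =>
      (n, items.filter (fun it => p (PySem.Str.lower it.1))) ::
        pvSieve rs (items.filter (fun it => !(p (PySem.Str.lower it.1))))

def categorize_defines_alt (defines : List (String × String)) : List (String × (List (String × String))) :=
  let groups := PySem.Dict.ofList (pvSieve pvPriority defines)
  -- groups[c]: every name of ORDER is a key of groups (sieve emits all 15 rule names plus 'Other'),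
  -- so Python's groups[c] never raises; getD is exact here
  (pvOrderB.filter (fun c => !(groups.getD c []).isEmpty)).map (fun c => (c, groups.getD c []))

-- ===== PRECONDITION & SPEC =====
def Spec_categorize_defines (defines : List (String × String)) (out : List (String × (List (String × String)))) : Prop := out = categorize_defines_alt defines
instance (defines : List (String × String)) (out : List (String × (List (String × String)))) : Decidable (Spec_categorize_defines defines out) := by unfold Spec_categorize_defines; infer_instance

-- ===== CLAIM (what is proved, stated in full; the proofs are below) =====
def Claim_equal_categorize_defines : Prop := ∀ (defines : List (String × String)), Dom_categorize_defines defines → Spec_categorize_defines defines (categorize_defines defines)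

-- ===== LEMMAS AND PROOFS =====

-- first-match classifier w.r.t. a rule list; 'Other' if no rule matches (proof-only helper)
def pvClassifyAux (rs : List (String × (String → Bool))) (lo : String) : String :=
  ((rs.find? (fun r => r.2 lo)).map (fun r => r.1)).getD "Other"

-- A's classification of one key and the items it files under category c
def pvKey (p : String × String) : String := pvClassifyAux pvPriority (PySem.Str.lower p.1)
def pvF (defines : List (String × String)) (c : String) : List (String × String) :=
  defines.filter (fun p => pvKey p == c)

theorem pv_lowerChar_idem (c : Char) : PySem.Chars.lowerChar (PySem.Chars.lowerChar c) = PySem.Chars.lowerChar c := by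
  unfold PySem.Chars.lowerChar PySem.Chars.isupper
  split_ifs with h1 h2 <;> try rfl
  exfalso
  simp only [Bool.and_eq_true, decide_eq_true_eq, Char.le_def] at h1 h2
  obtain ⟨a1, b1⟩ := h1
  obtain ⟨a2, b2⟩ := h2
  have hZ : ('Z' : Char).val.toNat = 90 := by decide
  have hA : ('A' : Char).val.toNat = 65 := by decide
  have hc : c.val.toNat ≤ 90 := by
    have := UInt32.le_iff_toNat_le.mp b1; omega
  have hv : (c.toNat + 32).isValidChar := by
    unfold Nat.isValidChar Char.toNat; left; omega
  have ht : (Char.ofNat (c.toNat + 32)).val.toNat = c.toNat + 32 :=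
    (Char.toNat_ofNat (c.toNat + 32)).trans (if_pos hv)
  have hb2 := UInt32.le_iff_toNat_le.mp b2
  rw [ht, hZ] at hb2
  have ha1 := UInt32.le_iff_toNat_le.mp a1
  rw [hA] at ha1
  have he : c.toNat = c.val.toNat := rfl
  rw [he] at hb2
  omega

theorem pv_lower_idem (s : String) : PySem.Str.lower (PySem.Str.lower s) = PySem.Str.lower s := by
  have h : (PySem.Str.lower (PySem.Str.lower s)).toList = (PySem.Str.lower s).toList := by
    simp [PySem.Str.toList_lower, PySem.Chars.lower, List.map_map, Function.comp, pv_lowerChar_idem]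
  exact String.toList_inj.mp h

-- A's elif cascade files p exactly under pvKey p
theorem pv_step_eq (cats : PySem.Dict String (List (String × String))) (p : String × String) :
    pvStepA cats p = cats.modify (pvKey p) [] (fun l => l ++ [(p.1, p.2)]) := by
  unfold pvStepA pvKey pvClassifyAux pvPriority
  simp only [pv_lower_idem, List.find?, List.any_cons, List.any_nil, Bool.or_false]
  generalize PySem.Str.lower p.1 = lo
  cases h0 : (PySem.Str.isIn "provider" lo || PySem.Str.isIn "lib_ctx" lo) <;> try rfl
  cases h1 : (PySem.Str.startswith lo "bio_" || lo == "bio_wait") <;> try rfl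
  cases h2 : (PySem.Str.startswith lo "ssl_") <;> try rfl
  cases h3 : (PySem.Str.startswith lo "evp_") <;> try rfl
  cases h4 : (PySem.Str.isIn "cipher" lo && !(PySem.Str.isIn "evp" lo)) <;> try rfl
  cases h5 : (PySem.Str.startswith lo "ossl_decoder" || PySem.Str.startswith lo "ossl_encoder") <;> try rfl
  cases h6 : (PySem.Str.startswith lo "ossl_prov_ctx") <;> try rfl
  cases h7 : (PySem.Str.isIn "err" lo) <;> try rfl
  cases h8 : (PySem.Str.startswith lo "dh_" || (PySem.Str.startswith lo "dsa_" || (PySem.Str.startswith lo "rsa_" || PySem.Str.startswith lo "ecdsa_"))) <;> try rfl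
  cases h9 : (PySem.Str.startswith lo "hmac_" || (PySem.Str.startswith lo "siphash_" || PySem.Str.startswith lo "poly1305_")) <;> try rfl
  cases h10 : (PySem.Str.startswith lo "pkcs12_" || PySem.Str.startswith lo "rand_") <;> try rfl
  cases h11 : (PySem.Str.startswith lo "bn_") <;> try rfl
  cases h12 : (PySem.Str.startswith lo "ossl_hpke" || PySem.Str.startswith lo "ossl_cmp") <;> try rfl
  cases h13 : (PySem.Str.isIn "ecpkparameters" lo) <;> try rfl
  cases h14 : (PySem.Str.isIn "ocsp" lo) <;> try rfl

-- classifier unfolding on a cons rule list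
theorem pv_classifyAux_cons (n : String) (p : String → Bool) (rs : List (String × (String → Bool))) (lo : String) :
    pvClassifyAux ((n, p) :: rs) lo = if p lo then n else pvClassifyAux rs lo := by
  unfold pvClassifyAux
  cases h : p lo with
  | true =>
    rw [List.find?_cons_of_pos (p := fun r => r.2 lo) (a := (n, p)) (l := rs) h]
    simp
  | false =>
    rw [List.find?_cons_of_neg (p := fun r => r.2 lo) (a := (n, p)) (l := rs) (by simp [h])]
    simp

-- the classifier only ever returns a rule name or 'Other'
theorem pv_classifyAux_mem (rs : List (String × (String → Bool))) (lo : String) :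
    pvClassifyAux rs lo ∈ rs.map (fun r => r.1) ∨ pvClassifyAux rs lo = "Other" := by
  induction rs with
  | nil => right; rfl
  | cons r rest ih =>
    obtain ⟨n, p⟩ := r
    rw [pv_classifyAux_cons]
    by_cases h : p lo = true
    · left; simp [h]
    · simp only [Bool.not_eq_true] at h
      rw [h, if_neg (by simp)]
      rcases ih with h1 | h2
      · left; simp [h1]
      · right; exact h2

-- every key of the cats dict built by A's loop is one of the 16 names
theorem pv_keys_sub (defines : List (String × String))
    (cats : PySem.Dict String (List (String × String)))
    (h : ∀ k ∈ cats.keys, k ∈ pvOrderA) :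
    ∀ k ∈ (defines.foldl
        (fun cats p => cats.modify (pvKey p) [] (fun l => l ++ [(p.1, p.2)]))
        cats).keys, k ∈ pvOrderA := by
  induction defines generalizing cats with
  | nil => exact h
  | cons p rest ih =>
    simp only [List.foldl_cons]
    apply ih
    intro k hk
    rw [PySem.Dict.keys_modify] at hk
    rcases (PySem.Dict.mem_keys_insert _ _ _ _).mp hk with h1 | h2
    · subst h1
      rcases pv_classifyAux_mem pvPriority (PySem.Str.lower p.1) with hm | ho
      · have hsub : ∀ x ∈ pvPriority.map (fun r => r.1), x ∈ pvOrderA := by decide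
        exact hsub _ hm
      · unfold pvKey; rw [ho]; simp [pvOrderA]
    · exact h k h2

-- keys of the sieve output, in order: the rule names then 'Other'
theorem pv_sieve_keys (rs : List (String × (String → Bool))) (items : List (String × String)) :
    (pvSieve rs items).map (fun r => r.1) = rs.map (fun r => r.1) ++ ["Other"] := by
  induction rs generalizing items with
  | nil => rfl
  | cons r rest ih => cases r with | mk n p => simp [pvSieve, ih]

-- get? through Dict.update (= foldl insert) when the pair list's keys are unique
theorem pv_get?_update_of_none {ν : Type} (l : List (String × ν)) (d : PySem.Dict String ν) (c : String)
    (h : l.find? (fun r => r.1 == c) = none) : (d.update l).get? c = d.get? c := by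
  induction l generalizing d with
  | nil => rfl
  | cons q t ih =>
    rw [List.find?_cons] at h
    cases hq : (q.1 == c) with
    | true => rw [hq] at h; simp at h
    | false =>
      rw [hq] at h
      have : (d.update (q :: t)).get? c = ((d.insert q.1 q.2).update t).get? c := rfl
      rw [this, ih _ h, PySem.Dict.get?_insert]
      have : ¬ (c = q.1) := fun he => by simp [he] at hq
      simp [this]

theorem pv_get?_update_of_find {ν : Type} (l : List (String × ν)) (d : PySem.Dict String ν) (c : String)
    (q : String × ν) (hnd : (l.map (fun r => r.1)).Nodup)
    (h : l.find? (fun r => r.1 == c) = some q) : (d.update l).get? c = some q.2 := by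
  induction l generalizing d with
  | nil => simp at h
  | cons a t ih =>
    rw [List.find?_cons] at h
    simp only [List.map_cons, List.nodup_cons] at hnd
    cases ha : (a.1 == c) with
    | true =>
      rw [ha] at h
      have haq : a = q := by simpa using h
      have hc : a.1 = c := by simpa using ha
      have hnone : t.find? (fun r => r.1 == c) = none := by
        apply List.find?_eq_none.mpr
        intro x hx hbe
        exact hnd.1 (by rw [hc]; exact (by simpa using hbe) ▸ List.mem_map_of_mem hx)
      have : (d.update (a :: t)).get? c = ((d.insert a.1 a.2).update t).get? c := rfl
      rw [this, pv_get?_update_of_none _ _ _ hnone, PySem.Dict.get?_insert, if_pos hc.symm, haq]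
    | false =>
      rw [ha] at h
      have : (d.update (a :: t)).get? c = ((d.insert a.1 a.2).update t).get? c := rfl
      rw [this, ih _ hnd.2 h]

-- the sieve's group for category c is exactly the items the first-match classifier files under c
theorem pv_sieve_find (rs : List (String × (String → Bool))) (items : List (String × String)) (c : String)
    (hnd : (rs.map (fun r => r.1)).Nodup) (ho : "Other" ∉ rs.map (fun r => r.1))
    (hc : c ∈ rs.map (fun r => r.1) ∨ c = "Other") :
    (pvSieve rs items).find? (fun r => r.1 == c) =
      some (c, items.filter (fun it => pvClassifyAux rs (PySem.Str.lower it.1) == c)) := by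
  induction rs generalizing items with
  | nil =>
    rcases hc with h | h
    · simp at h
    · subst h
      simp [pvSieve, List.find?, pvClassifyAux]
  | cons r rest ih =>
    cases r with | mk n p =>
    simp only [List.map_cons, List.nodup_cons] at hnd
    simp only [List.map_cons, List.mem_cons] at ho
    rw [not_or] at ho
    by_cases hcn : c = n
    · subst hcn
      rw [pvSieve, List.find?_cons_of_pos (by simp)]
      congr 1
      congr 1
      apply List.filter_congr
      intro it _
      rw [pv_classifyAux_cons]
      by_cases hp : p (PySem.Str.lower it.1) = true
      · simp [hp]
      · simp only [Bool.not_eq_true] at hp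
        rw [hp, if_neg (by simp)]
        rcases pv_classifyAux_mem rest (PySem.Str.lower it.1) with hm | hoth
        · have : pvClassifyAux rest (PySem.Str.lower it.1) ≠ c := fun he => hnd.1 (he ▸ hm)
          simp [this]
        · rw [hoth]
          have : ("Other" : String) ≠ c := ho.1
          simp [this]
    · have hne : ¬ (((n, items.filter (fun it => p (PySem.Str.lower it.1))).1 == c) = true) := by
        simp only [beq_iff_eq]
        exact fun h => hcn h.symm
      have hc' : c ∈ rest.map (fun r => r.1) ∨ c = "Other" := by
        rcases hc with h | h
        · simp only [List.map_cons, List.mem_cons] at h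
          rcases h with h | h
          · exact absurd h hcn
          · exact Or.inl h
        · exact Or.inr h
      rw [pvSieve, List.find?_cons_of_neg (p := fun r => r.1 == c)
        (a := (n, items.filter (fun it => p (PySem.Str.lower it.1))))
        (l := pvSieve rest (items.filter (fun it => !(p (PySem.Str.lower it.1))))) hne,
        ih _ hnd.2 ho.2 hc']
      congr 2
      rw [List.filter_filter]
      apply List.filter_congr
      intro it _
      rw [pv_classifyAux_cons]
      by_cases hp : p (PySem.Str.lower it.1) = true
      · have hnc : (n == c) = false := by
          simp only [beq_eq_false_iff_ne, ne_eq]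
          exact fun h => hcn h.symm
        simp [hp, hnc]
      · simp only [Bool.not_eq_true] at hp
        simp [hp]

-- B's groups dict holds, for each ORDER name, exactly the items A files under it
theorem pv_groups_getD (defines : List (String × String)) (c : String) (hmem : c ∈ pvOrderB) :
    (PySem.Dict.ofList (pvSieve pvPriority defines)).getD c [] = pvF defines c := by
  have hc : c ∈ pvPriority.map (fun r => r.1) ∨ c = "Other" := by
    have h : ∀ x ∈ pvOrderB, x ∈ pvPriority.map (fun r => r.1) ∨ x = "Other" := by decide
    exact h c hmem
  have hfind := pv_sieve_find pvPriority defines c (by decide) (by decide) hc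
  have hnd : ((pvSieve pvPriority defines).map (fun r => r.1)).Nodup := by
    rw [pv_sieve_keys]; decide
  have h2 : (PySem.Dict.ofList (pvSieve pvPriority defines)).get? c
      = some (defines.filter (fun it => pvClassifyAux pvPriority (PySem.Str.lower it.1) == c)) :=
    pv_get?_update_of_find _ _ _ _ hnd hfind
  rw [PySem.Dict.getD_eq_get?_getD, h2]
  rfl

-- A's cats dict: the value under any c is the items classified to c …
theorem pv_cats_getD (defines : List (String × String)) (c : String) :
    (defines.foldl (fun d p => d.modify (pvKey p) [] (fun l => l ++ [(p.1, p.2)])) PySem.Dict.empty).getD c []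
      = pvF defines c := by
  have hmap : defines.foldl (fun d p => d.modify (pvKey p) [] (fun l => l ++ [(p.1, p.2)])) PySem.Dict.empty
      = (defines.map (fun p => (pvKey p, p))).foldl
          (fun d q => d.modify q.1 [] (fun l => l ++ [q.2])) PySem.Dict.empty := by
    rw [List.foldl_map]
  rw [hmap, PySem.Dict.getD_foldl_modify_append, PySem.Dict.getD_empty]
  rw [List.filter_map]
  simp only [List.map_map]
  unfold pvF
  rw [show ((fun (q : String × (String × String)) => q.1 == c) ∘ (fun p => (pvKey p, p)))
      = (fun p => pvKey p == c) from rfl]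
  rw [show ((fun (q : String × (String × String)) => q.2) ∘ (fun p => (pvKey p, p))) = id from rfl]
  simp

-- … and c is a key of cats exactly when some item classifies to c
theorem pv_cats_contains (defines : List (String × String)) (c : String) :
    (defines.foldl (fun d p => d.modify (pvKey p) [] (fun l => l ++ [(p.1, p.2)])) PySem.Dict.empty).contains c
      = !(pvF defines c).isEmpty := by
  have hkeys : (defines.foldl (fun d p => d.modify (pvKey p) [] (fun l => l ++ [(p.1, p.2)])) PySem.Dict.empty).keys
      = PySem.Set.ofList (defines.map pvKey) := by
    rw [PySem.Dict.keys_foldl_modify_key defines pvKey [] (fun _ p => (fun l => l ++ [(p.1, p.2)]))]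
    rw [PySem.Dict.keys_empty]
    rfl
  by_cases h : c ∈ defines.map pvKey
  · have h1 : (defines.foldl (fun d p => d.modify (pvKey p) [] (fun l => l ++ [(p.1, p.2)])) PySem.Dict.empty).contains c = true := by
      rw [PySem.Dict.contains_iff_mem_keys, hkeys, PySem.Set.mem_ofList]; exact h
    rw [h1]
    obtain ⟨p, hp, hpc⟩ := List.mem_map.mp h
    have : p ∈ pvF defines c := by
      unfold pvF; rw [List.mem_filter]; exact ⟨hp, by simp [hpc]⟩
    cases he : (pvF defines c) with
    | nil => rw [he] at this; simp at this
    | cons x xs => simp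
  · have h1 : ¬ ((defines.foldl (fun d p => d.modify (pvKey p) [] (fun l => l ++ [(p.1, p.2)])) PySem.Dict.empty).contains c = true) := by
      rw [PySem.Dict.contains_iff_mem_keys, hkeys, PySem.Set.mem_ofList]; exact h
    rw [Bool.not_eq_true] at h1
    rw [h1]
    have h2 : pvF defines c = [] := by
      unfold pvF
      rw [List.filter_eq_nil_iff]
      intro p hp
      simp only [beq_iff_eq]
      exact fun he => h (List.mem_map.mpr ⟨p, hp, he⟩)
    rw [h2]
    rfl

-- ===== VERDICT (by name: the statement is the Claim_ definition above) =====
theorem categorize_defines_spec : Claim_equal_categorize_defines := by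
  intro defines _
  unfold Spec_categorize_defines categorize_defines categorize_defines_alt
  have hstep : pvStepA = (fun cats p => PySem.Dict.modify cats (pvKey p) [] (fun l => l ++ [(p.1, p.2)])) := by
    funext cats p; exact pv_step_eq cats p
  rw [hstep]
  set cats := defines.foldl
    (fun d p => PySem.Dict.modify d (pvKey p) [] (fun l => l ++ [(p.1, p.2)])) PySem.Dict.empty with hcats
  have hkeys : ∀ k ∈ cats.keys, k ∈ pvOrderA := by
    rw [hcats]
    apply pv_keys_sub
    intro k hk
    simp [PySem.Dict.keys, PySem.Dict.empty] at hk
  -- the "remaining categories" loop contributes nothing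
  have hrem : ∀ (r : List (String × (List (String × String)))),
      (PySem.List.sorted cats.keys (fun x => x) false).foldl
        (fun r cat => if !(pvOrderA.contains cat) then r ++ [(cat, cats.getD cat [])] else r) r = r := by
    intro r
    rw [PySem.List.foldl_append_if (fun cat => !(pvOrderA.contains cat)) (fun cat => (cat, cats.getD cat []))]
    have : (PySem.List.sorted cats.keys (fun x => x) false).filter (fun cat => !(pvOrderA.contains cat)) = [] := by
      rw [List.filter_eq_nil_iff]
      intro k hk
      have hm : k ∈ cats.keys := (PySem.List.mem_sorted _ _ _ k).mp hk
      simp [hkeys k hm]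
    rw [this]; simp
  rw [hrem]
  -- A's ordered emission loop is a filter-then-map over the order list
  rw [PySem.List.foldl_append_if (fun cat => cats.contains cat) (fun cat => (cat, cats.getD cat []))]
  rw [List.nil_append]
  -- same filter …
  have hord : pvOrderA = pvOrderB := rfl
  rw [hord]
  have hfil : pvOrderB.filter (fun cat => cats.contains cat)
      = pvOrderB.filter (fun c => !((PySem.Dict.ofList (pvSieve pvPriority defines)).getD c []).isEmpty) := by
    apply List.filter_congr
    intro c hc
    rw [hcats, pv_cats_contains, pv_groups_getD defines c hc]
  rw [hfil]
  -- … then the same per-category pair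
  apply List.map_congr_left
  intro c hc
  have hmem : c ∈ pvOrderB := List.mem_of_mem_filter hc
  rw [hcats, pv_cats_getD, pv_groups_getD defines c hmem]
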